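-- pv_equiv track=rewrite | github.com/trungit03/CoderByte | Medium/StringReduction.py | StringReduction
-- ===== SOURCE A (Python) =====
-- def StringReduction (string):
--     string_reductions = {
--         'ac': 'b',
--         'ca': 'b',
--         'bc': 'a',
--         'ab': 'c',
--         'cb':'a'
--     }
--
--     string_reduction = ""
--     flag = False
--     i = 0
--     while i < len(string):
--         if i < len(string) - 1:
--             substring = string[i] + string[i+1]
--             if substring in string_reductions:
--                 flag = True
--                 string_reduction += string_reductions[substring]
--                 i+=2
--             else:
--                 string_reduction += string[i]
--                 i += 1
--         else:
--             string_reduction += string[i]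
--             i += 1
--     if flag:
--         return StringReduction(string_reduction)
--     else:
--         return len(string_reduction)
-- ===== SOURCE B (Python) =====
-- def StringReduction(string):
--     s = string
--     while True:
--         t = _reduce_pass(s)
--         if len(t) == len(s):
--             return len(t)
--         s = t
--
--
-- def _reduce_pass(s):
--     out = []
--     i = 0
--     n = len(s)
--     while i < n - 1:
--         r = _reduce2(s[i], s[i + 1])
--         if r is not None:
--             out.append(r)
--             i += 2
--         else:
--             out.append(s[i])
--             i += 1
--     if i == n - 1:
--         out.append(s[i])
--     return ''.join(out)
--
--
-- def _reduce2(x, y):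
--     if x == 'a' and y == 'c':
--         return 'b'
--     if x == 'c' and y == 'a':
--         return 'b'
--     if x == 'b' and y == 'c':
--         return 'a'
--     if x == 'a' and y == 'b':
--         return 'c'
--     if x == 'c' and y == 'b':
--         return 'a'
--     return None
-- ===== Notes on version B (the rewrite author's own statement) =====
-- stated objective: alternative
-- what changed: Replaces A's tail recursion with a changed flag and a string-keyed dict by an iterate-until-fixpoint outer loop whose single pass uses a direct five-branch pair-reduction function and an output accumulator, detecting stabilisation by comparing lengths instead of a flag.
import Mathlib
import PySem

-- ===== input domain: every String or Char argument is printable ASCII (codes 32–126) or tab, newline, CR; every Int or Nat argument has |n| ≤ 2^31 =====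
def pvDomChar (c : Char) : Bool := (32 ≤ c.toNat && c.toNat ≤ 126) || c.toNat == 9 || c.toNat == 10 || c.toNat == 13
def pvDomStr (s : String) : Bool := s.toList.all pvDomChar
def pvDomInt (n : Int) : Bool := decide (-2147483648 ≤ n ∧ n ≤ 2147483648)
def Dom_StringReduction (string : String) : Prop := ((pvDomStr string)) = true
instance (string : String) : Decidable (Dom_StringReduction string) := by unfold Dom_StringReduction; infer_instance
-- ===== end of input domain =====

-- B replaces A's flag-and-dict tail recursion by an iterate-until-fixpoint loop whose pass is a
-- structural recursion with a direct pair-reduction function, comparing lengths instead of a flag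
-- (objective: alternative decomposition, same cost).

-- ===== PORT A =====

-- A's five-entry reduction dict (string-keyed, as in the Python)
def srDict : PySem.Dict String String :=
  PySem.Dict.ofList [("ac", "b"), ("ca", "b"), ("bc", "a"), ("ab", "c"), ("cb", "a")]

-- A's inner while-i loop, as structural recursion on the remaining suffix of the string
def aPass : List Char → List Char × Bool
  | [] => ([], false)
  | [c] => ([c], false)
  | c1 :: c2 :: rest =>
    match srDict.get? (String.ofList [c1, c2]) with
    | some r => ((r.toList ++ (aPass rest).1), true)
    | none => (c1 :: (aPass (c2 :: rest)).1, (aPass (c2 :: rest)).2)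

-- dict values are single characters, so a matching pass strictly shrinks the string
theorem srDict_val (k r : String) (h : srDict.get? k = some r) : r.toList.length = 1 := by
  unfold srDict PySem.Dict.ofList at h
  simp [PySem.Dict.get?, PySem.Dict.update, PySem.Dict.insert, PySem.Dict.empty, List.find?] at h
  obtain ⟨a, h⟩ := h
  repeat' split at h
  all_goals simp_all
  all_goals (obtain ⟨-, rfl⟩ := h; decide)

theorem aPass_len : ∀ l : List Char,
    (aPass l).1.length ≤ l.length ∧ ((aPass l).2 = true → (aPass l).1.length < l.length)
  | [] => by simp [aPass]
  | [c] => by simp [aPass]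
  | c1 :: c2 :: rest => by
    cases h : srDict.get? (String.ofList [c1, c2]) with
    | some r =>
      have hr := srDict_val _ _ h
      have ih := aPass_len rest
      simp [aPass, h, hr]; omega
    | none =>
      have ih := aPass_len (c2 :: rest)
      simp only [List.length_cons] at ih ⊢
      refine ⟨?_, fun hf => ?_⟩
      · have ih1 := ih.1
        simp only [aPass, h]
        simp
        omega
      · simp only [aPass, h] at hf ⊢
        have ih2 := ih.2 hf
        simp
        omega
termination_by l => l.length

-- A's recursion: rebuild the string, recurse while the flag is set
def srGo (l : List Char) : Int :=
  if (aPass l).2 then srGo (aPass l).1 else ((aPass l).1.length : Int)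
termination_by l.length
decreasing_by exact (aPass_len l).2 (by assumption)

def StringReduction (string : String) : Int := srGo string.toList

-- ===== PORT B =====

-- B's pair reducer: the explicit five-branch if-chain of _reduce2
def bRed2 (x y : Char) : Option Char :=
  if x = 'a' ∧ y = 'c' then some 'b'
  else if x = 'c' ∧ y = 'a' then some 'b'
  else if x = 'b' ∧ y = 'c' then some 'a'
  else if x = 'a' ∧ y = 'b' then some 'c'
  else if x = 'c' ∧ y = 'b' then some 'a'
  else none

-- B's single left-to-right pass (_reduce_pass), structural recursion on the char list
def bPass : List Char → List Char
  | [] => []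
  | [c] => [c]
  | x :: y :: rest =>
    match bRed2 x y with
    | some r => r :: bPass rest
    | none => x :: bPass (y :: rest)

-- a pass never lengthens the string (termination measure for B's outer loop)
theorem bPass_le : ∀ l : List Char, (bPass l).length ≤ l.length
  | [] => by simp [bPass]
  | [c] => by simp [bPass]
  | x :: y :: rest => by
    cases h : bRed2 x y with
    | some r => have := bPass_le rest; simp [bPass, h]; omega
    | none => have := bPass_le (y :: rest); simp only [bPass, h, List.length_cons] at *; omega
termination_by l => l.length

-- B's while-True loop: pass, then stop when the length is unchanged
def bIter (l : List Char) : Int :=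
  if (bPass l).length = l.length then ((bPass l).length : Int) else bIter (bPass l)
termination_by l.length
decreasing_by exact lt_of_le_of_ne (bPass_le l) (by assumption)

def StringReduction_alt (string : String) : Int := bIter string.toList

-- ===== PRECONDITION & SPEC =====
def Spec_StringReduction (string : String) (out : Int) : Prop := out = StringReduction_alt string
instance (string : String) (out : Int) : Decidable (Spec_StringReduction string out) := by unfold Spec_StringReduction; infer_instance

-- ===== CLAIM (what is proved, stated in full; the proofs are below) =====
def Claim_equal_StringReduction : Prop := ∀ (string : String), Dom_StringReduction string → Spec_StringReduction string (StringReduction string)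

-- ===== LEMMAS AND PROOFS =====

-- a two-char string key equals a literal key iff the characters match
theorem key_iff (x y a b : Char) (s : String) (h : s.toList = [a, b]) :
    (String.ofList [x, y] = s) ↔ (x = a ∧ y = b) := by
  rw [← String.toList_inj, String.toList_ofList, h]; simp

-- A's dict lookup on a two-char key computes exactly B's pair reducer
theorem dict_eq (x y : Char) :
    srDict.get? (String.ofList [x, y]) = Option.map (fun c => String.ofList [c]) (bRed2 x y) := by
  simp only [bRed2]
  split_ifs with h1 h2 h3 h4 h5
  · obtain ⟨rfl, rfl⟩ := h1; decide
  · obtain ⟨rfl, rfl⟩ := h2; decide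
  · obtain ⟨rfl, rfl⟩ := h3; decide
  · obtain ⟨rfl, rfl⟩ := h4; decide
  · obtain ⟨rfl, rfl⟩ := h5; decide
  · rw [Option.map_none, PySem.Dict.get?_eq_none_iff_not_mem_keys]
    have hk : srDict.keys = ["ac", "ca", "bc", "ab", "cb"] := by decide
    rw [hk]
    simp only [List.mem_cons, List.not_mem_nil, or_false,
      key_iff x y 'a' 'c' "ac" (by decide), key_iff x y 'c' 'a' "ca" (by decide),
      key_iff x y 'b' 'c' "bc" (by decide), key_iff x y 'a' 'b' "ab" (by decide),
      key_iff x y 'c' 'b' "cb" (by decide)]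
    tauto

theorem bPass_eq_aPass : ∀ l : List Char, bPass l = (aPass l).1
  | [] => by simp [bPass, aPass]
  | [c] => by simp [bPass, aPass]
  | x :: y :: rest => by
    rw [aPass, bPass, dict_eq]
    cases h : bRed2 x y with
    | some r => simp [bPass_eq_aPass rest, String.toList_ofList]
    | none => simp [bPass_eq_aPass (y :: rest)]
termination_by l => l.length

-- when A's flag is false, the pass is the identity (so the lengths agree)
theorem aPass_flag_false : ∀ l : List Char, (aPass l).2 = false → (aPass l).1 = l
  | [] => by simp [aPass]
  | [c] => by simp [aPass]
  | x :: y :: rest => by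
    intro hf
    cases h : srDict.get? (String.ofList [x, y]) with
    | some r => simp [aPass, h] at hf
    | none =>
      simp only [aPass, h] at hf ⊢
      simp [aPass_flag_false (y :: rest) hf]
termination_by l => l.length

-- the flag is set iff the pass shrank the string
theorem aPass_flag_iff (l : List Char) : (aPass l).2 = true ↔ (aPass l).1.length ≠ l.length := by
  constructor
  · intro h; exact Nat.ne_of_lt ((aPass_len l).2 h)
  · intro h
    cases hf : (aPass l).2 with
    | false => exact absurd (by rw [aPass_flag_false l hf]) h
    | true => rfl

theorem srGo_eq_bIter : ∀ l : List Char, srGo l = bIter l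
  | l => by
    rw [srGo, bIter, bPass_eq_aPass]
    by_cases h : (aPass l).2 = true
    · rw [if_pos h, if_neg ((aPass_flag_iff l).1 h)]
      exact srGo_eq_bIter (aPass l).1
    · have hlen : (aPass l).1.length = l.length := by
        by_contra hne; exact h ((aPass_flag_iff l).2 hne)
      rw [if_neg h, if_pos hlen]
termination_by l => l.length
decreasing_by exact (aPass_len l).2 (by assumption)

-- ===== VERDICT (by name: the statement is the Claim_ definition above) =====
theorem StringReduction_spec : Claim_equal_StringReduction := by
  intro s _
  show StringReduction s = StringReduction_alt s
  exact srGo_eq_bIter s.toList
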